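-- pv_equiv track=rewrite | github.com/RocketFramework/AITrader | SymbolPredictor.py | count_signals
-- ===== SOURCE A (Python) =====
-- def count_signals(indicator_data):
--     """
--     Count the number of Buy, Sell, and Neutral signals in the indicator data.
--
--     Parameters:
--         indicator_data (list of dict): List of dictionaries, where each contains a date and a signal.
--
--     Returns:
--         dict: A dictionary with counts for each signal type.
--     """
--     buy_count = 0
--     sell_count = 0
--     neutral_count = 0
--
--     # Iterate over the signals
--     for entry in indicator_data:
--         signal = entry.get("Signal", "Neutral")  # Default to "Neutral" if "Signal" key is missing
--         if signal == "Buy":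
--             buy_count += 1
--         elif signal == "Sell":
--             sell_count += 1
--         else:
--             neutral_count += 1
--
--     return {
--         "Buy": buy_count,
--         "Sell": sell_count,
--         "Neutral": neutral_count
--     }
-- ===== SOURCE B (Python) =====
-- def count_signals(indicator_data):
--     signals = [entry.get("Signal", "Neutral") for entry in indicator_data]
--     buy = signals.count("Buy")
--     sell = signals.count("Sell")
--     return {
--         "Buy": buy,
--         "Sell": sell,
--         "Neutral": len(signals) - buy - sell
--     }
-- ===== Notes on version B (the rewrite author's own statement) =====
-- stated objective: idiomatic
-- what changed: Replaced the per-element three-way classifying loop with a flat list of signals and two list.count scans, obtaining Neutral as the residual len - buy - sell instead of an else-branch.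
import Mathlib
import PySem

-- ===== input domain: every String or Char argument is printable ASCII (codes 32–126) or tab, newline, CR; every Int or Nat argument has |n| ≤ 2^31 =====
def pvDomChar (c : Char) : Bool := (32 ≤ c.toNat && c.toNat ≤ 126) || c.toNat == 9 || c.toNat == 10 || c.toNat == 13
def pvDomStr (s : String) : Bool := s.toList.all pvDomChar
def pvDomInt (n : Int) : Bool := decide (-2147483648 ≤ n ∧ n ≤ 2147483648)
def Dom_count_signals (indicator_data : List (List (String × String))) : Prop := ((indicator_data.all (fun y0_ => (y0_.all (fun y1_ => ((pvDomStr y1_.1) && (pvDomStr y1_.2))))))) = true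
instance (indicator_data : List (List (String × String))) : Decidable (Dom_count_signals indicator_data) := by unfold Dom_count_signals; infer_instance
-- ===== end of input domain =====

-- B replaces A's three-way classifying loop by a mapped signal list, two counts, and Neutral as the residual len - buy - sell (objective: idiomatic); same cost as A.


-- ===== PORT A =====
-- Literal port of A: one classifying fold over the entries with three counters.
def count_signals (indicator_data : List (List (String × String))) : List (String × Int) :=
  let counts := indicator_data.foldl (fun (acc : Int × Int × Int) entry =>
    let signal := (PySem.Dict.mk entry).getD "Signal" "Neutral"
    if signal == "Buy" then (acc.1 + 1, acc.2.1, acc.2.2)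
    else if signal == "Sell" then (acc.1, acc.2.1 + 1, acc.2.2)
    else (acc.1, acc.2.1, acc.2.2 + 1)) (0, 0, 0)
  [("Buy", counts.1), ("Sell", counts.2.1), ("Neutral", counts.2.2)]

-- ===== PORT B =====
-- Port of B: map to a flat signal list, two counts, Neutral by residual.
def count_signals_alt (indicator_data : List (List (String × String))) : List (String × Int) :=
  let signals := indicator_data.map (fun entry => (PySem.Dict.mk entry).getD "Signal" "Neutral")
  let buy : Int := PySem.List.count signals "Buy"
  let sell : Int := PySem.List.count signals "Sell"
  [("Buy", buy), ("Sell", sell), ("Neutral", (signals.length : Int) - buy - sell)]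

-- ===== PRECONDITION & SPEC =====
def Spec_count_signals (indicator_data : List (List (String × String))) (out : List (String × Int)) : Prop := out = count_signals_alt indicator_data
instance (indicator_data : List (List (String × String))) (out : List (String × Int)) : Decidable (Spec_count_signals indicator_data out) := by unfold Spec_count_signals; infer_instance

-- ===== CLAIM (what is proved, stated in full; the proofs are below) =====
def Claim_equal_count_signals : Prop := ∀ (indicator_data : List (List (String × String))), Dom_count_signals indicator_data → Spec_count_signals indicator_data (count_signals indicator_data)

-- ===== LEMMAS AND PROOFS =====

-- ===== VERDICT (by name: the statement is the Claim_ definition above) =====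
lemma csig_fold (l : List (List (String × String))) (b s n : Int) :
    l.foldl (fun (acc : Int × Int × Int) entry =>
      let signal := (PySem.Dict.mk entry).getD "Signal" "Neutral"
      if signal == "Buy" then (acc.1 + 1, acc.2.1, acc.2.2)
      else if signal == "Sell" then (acc.1, acc.2.1 + 1, acc.2.2)
      else (acc.1, acc.2.1, acc.2.2 + 1)) (b, s, n) =
    (b + ((l.map (fun entry => (PySem.Dict.mk entry).getD "Signal" "Neutral")).count "Buy" : Int),
     s + ((l.map (fun entry => (PySem.Dict.mk entry).getD "Signal" "Neutral")).count "Sell" : Int),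
     n + ((l.map (fun entry => (PySem.Dict.mk entry).getD "Signal" "Neutral")).countP
       (fun x => ¬ (x = "Buy" ∨ x = "Sell")) : Int)) := by
  induction l generalizing b s n with
  | nil => simp
  | cons e t ih =>
    simp only [List.foldl_cons, List.map_cons]
    rw [ih]
    by_cases hb : (PySem.Dict.mk e).getD "Signal" "Neutral" = "Buy"
    · simp [hb, List.count_cons, List.countP_cons]
      ring
    · by_cases hs : (PySem.Dict.mk e).getD "Signal" "Neutral" = "Sell"
      · simp [hb, hs, List.count_cons, List.countP_cons]
        ring
      · simp [hb, hs, List.count_cons, List.countP_cons]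
        ring

lemma countP_residual_nat (sigs : List String) :
    sigs.countP (fun x => ¬ (x = "Buy" ∨ x = "Sell")) + sigs.count "Buy" + sigs.count "Sell" = sigs.length := by
  induction sigs with
  | nil => simp
  | cons h t ih =>
    simp only [List.countP_cons, List.count_cons, List.length_cons]
    by_cases hb : h = "Buy" <;> by_cases hs : h = "Sell" <;> simp_all <;> omega

lemma countP_residual (sigs : List String) :
    (sigs.countP (fun x => ¬ (x = "Buy" ∨ x = "Sell")) : Int) =
    (sigs.length : Int) - (sigs.count "Buy" : Int) - (sigs.count "Sell" : Int) := by
  have := countP_residual_nat sigs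
  push_cast
  omega

theorem count_signals_spec : Claim_equal_count_signals := by
  intro l _
  unfold Spec_count_signals count_signals count_signals_alt
  simp only [PySem.List.count_eq]
  rw [csig_fold]
  rw [countP_residual]
  simp
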